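-- pv_equiv track=rewrite | github.com/imdangi/HackerRank_Python_Practice | 01_IntermediateQue1.py | maxPairs
-- ===== SOURCE A (Python) =====
-- def maxPairs(skillLevel, minDiff):
--     count=0
--     skillLevel.sort()
--     for i in skillLevel:
--         for j in skillLevel:
--             if i!=j:
--                 if(i-j>minDiff):
--                     count+=1
--     return count
-- ===== SOURCE B (Python) =====
-- def maxPairs(skillLevel, minDiff):
--     # Like A, sorts skillLevel in place; return value is what is proved equivalent.
--     skillLevel.sort()
--     s = skillLevel
--     n = len(s)
--     counts = {}
--     for x in s:
--         counts[x] = counts.get(x, 0) + 1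
--     total = 0
--     for x in s:
--         # binary search: number of elements < x - minDiff
--         t = x - minDiff
--         lo, hi = 0, n
--         while lo < hi:
--             mid = (lo + hi) // 2
--             if s[mid] < t:
--                 lo = mid + 1
--             else:
--                 hi = mid
--         c = lo
--         if minDiff < 0:
--             c -= counts.get(x, 0)
--         total += c
--     return total
-- ===== Notes on version B (the rewrite author's own statement) =====
-- stated objective: faster
-- what changed: Replaces A's O(n^2) double scan over the list by sort + one binary search per element (count of values below x-minDiff) with a frequency-dict correction for equal values when minDiff is negative.
import Mathlib
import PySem

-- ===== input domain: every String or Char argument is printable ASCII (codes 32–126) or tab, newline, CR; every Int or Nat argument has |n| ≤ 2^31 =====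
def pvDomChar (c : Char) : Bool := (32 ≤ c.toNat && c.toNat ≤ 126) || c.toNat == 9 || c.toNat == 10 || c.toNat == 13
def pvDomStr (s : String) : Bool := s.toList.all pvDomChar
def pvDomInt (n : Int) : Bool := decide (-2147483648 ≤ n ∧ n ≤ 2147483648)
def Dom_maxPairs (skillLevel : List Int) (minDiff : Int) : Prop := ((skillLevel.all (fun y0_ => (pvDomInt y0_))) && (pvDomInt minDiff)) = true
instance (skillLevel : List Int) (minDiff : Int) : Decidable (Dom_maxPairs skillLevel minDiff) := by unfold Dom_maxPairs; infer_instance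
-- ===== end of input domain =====

-- B replaces A's O(n^2) double scan by sort + per-element binary search with a duplicate
-- correction from a frequency dict (O(n log n)). Both A and B sort skillLevel in place;
-- the equivalence proved here is about the RETURN value.

-- ===== PORT A =====
def maxPairs (skillLevel : List Int) (minDiff : Int) : Int :=
  let s := PySem.List.sorted skillLevel (fun x => x) false
  s.foldl (fun count i =>
    s.foldl (fun count j =>
      if i ≠ j then (if i - j > minDiff then count + 1 else count) else count) count) 0

-- ===== PORT B =====
-- the 'while lo < hi' binary-search loop of Source B; s[mid] ported as pyGetD s mid 0,
-- exact because every call keeps 0 ≤ lo ≤ mid < hi ≤ len(s)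
def bsLoop (s : List Int) (t : Int) (lo hi : Int) : Int :=
  if h : lo < hi then
    let mid := PySem.Int.floordiv (lo + hi) 2
    if PySem.List.pyGetD s mid 0 < t then bsLoop s t (mid + 1) hi
    else bsLoop s t lo mid
  else lo
termination_by (hi - lo).toNat
decreasing_by
  · have hb := PySem.Int.floordiv_two_mid_bounds (le_of_lt h)
    omega
  · have hb : PySem.Int.floordiv (lo + hi) 2 < hi := by
      rw [PySem.Int.floordiv_lt_iff_lt_mul (by norm_num)]; omega
    omega

def maxPairs_alt (skillLevel : List Int) (minDiff : Int) : Int :=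
  let s := PySem.List.sorted skillLevel (fun x => x) false
  let n : Int := s.length
  let counts := s.foldl (fun d x => d.insert x (d.getD x 0 + 1)) PySem.Dict.empty
  s.foldl (fun total x =>
    let t := x - minDiff
    let lo := bsLoop s t 0 n
    let c := if minDiff < 0 then lo - counts.getD x 0 else lo
    total + c) 0

-- ===== PRECONDITION & SPEC =====
def Spec_maxPairs (skillLevel : List Int) (minDiff : Int) (out : Int) : Prop := out = maxPairs_alt skillLevel minDiff
instance (skillLevel : List Int) (minDiff : Int) (out : Int) : Decidable (Spec_maxPairs skillLevel minDiff out) := by unfold Spec_maxPairs; infer_instance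

-- ===== CLAIM (what is proved, stated in full; the proofs are below) =====
def Claim_equal_maxPairs : Prop := ∀ (skillLevel : List Int) (minDiff : Int), Dom_maxPairs skillLevel minDiff → Spec_maxPairs skillLevel minDiff (maxPairs skillLevel minDiff)

-- ===== LEMMAS AND PROOFS =====

-- splitting a countP by a second test
theorem countP_and_split (l : List Int) (p q : Int → Bool) :
    l.countP p = l.countP (fun y => p y && q y) + l.countP (fun y => p y && !q y) := by
  induction l with
  | nil => simp
  | cons a l ih =>
    simp only [List.countP_cons, ih]
    cases hp : p a <;> cases hq : q a <;> simp <;> omega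

-- a list whose first r elements satisfy p and whose remaining elements do not has countP p = r
theorem countP_of_split (s : List Int) (p : Int → Bool) (r : Nat) (hr : r ≤ s.length)
    (hlow : ∀ (k : Nat) (hk : k < s.length), k < r → p s[k])
    (hhigh : ∀ (k : Nat) (hk : k < s.length), r ≤ k → ¬ p s[k]) :
    s.countP p = r := by
  have hsplit : s = s.take r ++ s.drop r := (List.take_append_drop r s).symm
  rw [hsplit, List.countP_append]
  have h1 : (s.take r).countP p = r := by
    have : ∀ a ∈ s.take r, p a := by
      intro a ha
      obtain ⟨i, hi, hget⟩ := List.mem_iff_getElem.mp ha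
      have hi' : i < r := by
        simp [List.length_take] at hi; omega
      have hilen : i < s.length := lt_of_lt_of_le hi' hr
      have : (s.take r)[i] = s[i] := List.getElem_take
      subst hget; rw [this]; exact hlow i hilen hi'
    rw [List.countP_eq_length.mpr this, List.length_take]; omega
  have h2 : (s.drop r).countP p = 0 := by
    apply List.countP_eq_zero.mpr
    intro a ha
    obtain ⟨i, hi, hget⟩ := List.mem_iff_getElem.mp ha
    have hilen : r + i < s.length := by
      simp [List.length_drop] at hi; omega
    have : (s.drop r)[i] = s[r + i] := List.getElem_drop
    subst hget; rw [this]; exact hhigh (r + i) hilen (by omega)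
  omega

-- the binary-search loop returns the number of elements below t (sorted input)
theorem bsLoop_spec (s : List Int) (t : Int) (hpair : s.Pairwise (· ≤ ·)) :
    ∀ (lo hi : Int), 0 ≤ lo → lo ≤ hi → hi ≤ s.length →
    (∀ (k : Nat) (hk : k < s.length), (k : Int) < lo → s[k] < t) →
    (∀ (k : Nat) (hk : k < s.length), hi ≤ (k : Int) → ¬ s[k] < t) →
    bsLoop s t lo hi = (s.countP (fun y => decide (y < t)) : Int) := by
  have hmono : ∀ (i j : Nat) (hi : i < s.length) (hj : j < s.length), i ≤ j → s[i] ≤ s[j] := by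
    intro i j hi hj hij
    rcases Nat.lt_or_ge i j with h | h
    · exact List.pairwise_iff_getElem.mp hpair i j hi hj h
    · have : i = j := by omega
      subst this; rfl
  intro lo hi
  induction lo, hi using bsLoop.induct s t with
  | case1 lo hi h mid hlt ih =>
    intro h0 hlh hhn hlow hhigh
    have hb := PySem.Int.floordiv_two_mid_bounds (le_of_lt h)
    have hmidlt : PySem.Int.floordiv (lo + hi) 2 < hi := by
      rw [PySem.Int.floordiv_lt_iff_lt_mul (by norm_num)]; omega
    rw [bsLoop]
    simp only [dif_pos h]
    rw [show PySem.Int.floordiv (lo + hi) 2 = mid from rfl, if_pos hlt]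
    have hmid0 : (0:Int) ≤ mid := by simp only [mid]; omega
    have hmidn : mid < (s.length : Int) := by simp only [mid]; omega
    have hgm : PySem.List.pyGetD s mid 0 = s[mid.toNat]'(by omega) := by
      exact PySem.List.pyGetD_eq_getElem s 0 hmid0 hmidn
    apply ih (by omega) (by omega) hhn
    · intro k hk hklt
      rcases lt_or_ge (k : Int) lo with hc | hc
      · exact hlow k hk hc
      · have hkm : k ≤ mid.toNat := by omega
        have := hmono k mid.toNat hk (by omega) hkm
        calc s[k] ≤ s[mid.toNat]'(by omega) := this
          _ < t := by rw [← hgm]; exact hlt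
    · exact hhigh
  | case2 lo hi h mid hnlt ih =>
    intro h0 hlh hhn hlow hhigh
    have hb := PySem.Int.floordiv_two_mid_bounds (le_of_lt h)
    have hmidlt : PySem.Int.floordiv (lo + hi) 2 < hi := by
      rw [PySem.Int.floordiv_lt_iff_lt_mul (by norm_num)]; omega
    rw [bsLoop]
    simp only [dif_pos h]
    rw [show PySem.Int.floordiv (lo + hi) 2 = mid from rfl, if_neg hnlt]
    have hmid0 : (0:Int) ≤ mid := by simp only [mid]; omega
    have hmidn : mid < (s.length : Int) := by simp only [mid]; omega
    have hgm : PySem.List.pyGetD s mid 0 = s[mid.toNat]'(by omega) := by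
      exact PySem.List.pyGetD_eq_getElem s 0 hmid0 hmidn
    apply ih h0 (by omega) (by omega) hlow
    · intro k hk hkge habs
      apply hnlt
      rw [hgm]
      calc s[mid.toNat]'(by omega) ≤ s[k] := hmono mid.toNat k (by omega) hk (by omega)
        _ < t := habs
  | case3 lo hi h =>
    intro h0 hlh hhn hlow hhigh
    rw [bsLoop]
    simp only [dif_neg h]
    have hlohi : lo = hi := by omega
    have : s.countP (fun y => decide (y < t)) = lo.toNat := by
      apply countP_of_split s _ lo.toNat (by omega)
      · intro k hk hkr
        simpa using hlow k hk (by omega)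
      · intro k hk hkr
        simp only [decide_eq_true_eq]
        exact hhigh k hk (by omega)
    rw [this]; omega

-- the per-element count of A's inner loop equals B's binary search minus the duplicate correction
theorem per_element (s : List Int) (minDiff x : Int) (hpair : s.Pairwise (· ≤ ·)) :
    (s.countP (fun y => decide (x ≠ y ∧ x - y > minDiff)) : Int) =
      bsLoop s (x - minDiff) 0 s.length -
        (if minDiff < 0 then (s.count x : Int) else 0) := by
  set t := x - minDiff with ht
  rw [bsLoop_spec s t hpair 0 s.length (by omega) (by exact_mod_cast Int.natCast_nonneg _) le_rfl
      (by intro k hk hkl; omega) (by intro k hk hkl; omega)]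
  have hsplit := countP_and_split s (fun y => decide (y < t)) (fun y => y == x)
  have he1 : s.countP (fun y => decide (y < t) && (y == x)) =
      if minDiff < 0 then s.count x else 0 := by
    by_cases hm : minDiff < 0
    · rw [if_pos hm, List.count_eq_countP]
      apply List.countP_congr
      intro y _
      constructor
      · intro hy; simp only [Bool.and_eq_true] at hy; simpa using hy.2
      · intro hy
        have hyx : y = x := by simpa using hy
        subst hyx
        simp only [Bool.and_eq_true, beq_self_eq_true, and_true, decide_eq_true_eq]
        omega
    · rw [if_neg hm]
      apply List.countP_eq_zero.mpr
      intro y _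
      simp only [Bool.and_eq_true, decide_eq_true_eq, beq_iff_eq, not_and]
      intro hlt hyx
      subst hyx
      omega
  have he2 : s.countP (fun y => decide (x ≠ y ∧ x - y > minDiff)) =
      s.countP (fun y => decide (y < t) && !(y == x)) := by
    apply List.countP_congr
    intro y _
    simp only [decide_eq_true_eq, Bool.and_eq_true, Bool.not_eq_true', beq_eq_false_iff_ne,
      ne_eq]
    constructor
    · rintro ⟨hne, hgt⟩; exact ⟨by omega, fun hyx => hne hyx.symm⟩
    · rintro ⟨hlt, hne⟩; exact ⟨fun hxy => hne hxy.symm, by omega⟩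
  rw [he2]
  by_cases hm : minDiff < 0
  · rw [if_pos hm]; rw [if_pos hm] at he1; omega
  · rw [if_neg hm]; rw [if_neg hm] at he1; omega

-- ===== VERDICT (by name: the statement is the Claim_ definition above) =====
theorem maxPairs_spec : Claim_equal_maxPairs := by
  intro skillLevel minDiff _
  unfold Spec_maxPairs maxPairs maxPairs_alt
  set s := PySem.List.sorted skillLevel (fun x => x) false with hs
  have hpair : s.Pairwise (· ≤ ·) := PySem.List.sorted_pairwise skillLevel (fun x => x)
  -- A's inner loop is a countP
  have hA : s.foldl (fun count i =>
      s.foldl (fun count j =>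
        if i ≠ j then (if i - j > minDiff then count + 1 else count) else count) count) 0 =
      (s.map (fun x => (s.countP (fun y => decide (x ≠ y ∧ x - y > minDiff)) : Int))).sum := by
    rw [PySem.List.foldl_congr_mem s _
      (fun count i => count + (s.countP (fun y => decide (i ≠ y ∧ i - y > minDiff)) : Int)) 0 ?_]
    · rw [PySem.List.foldl_add]; simp
    · intro acc x _
      rw [PySem.List.foldl_congr_mem s _
        (fun count j => if x ≠ j ∧ x - j > minDiff then count + 1 else count) acc ?_]
      · exact PySem.List.foldl_ite_add_one _ s acc
      · intro acc' y _
        by_cases h1 : x ≠ y <;> by_cases h2 : x - y > minDiff <;> simp [h1, h2]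
  rw [hA]
  -- B's loop, with the counter dict replaced by List.count
  rw [PySem.List.foldl_congr_mem s _
    (fun total x => total +
      (bsLoop s (x - minDiff) 0 s.length - (if minDiff < 0 then (s.count x : Int) else 0))) 0 ?_]
  · rw [PySem.List.foldl_add]
    simp only [zero_add]
    congr 1
    apply List.map_congr_left
    intro x _
    exact per_element s minDiff x hpair
  · intro acc x _
    simp only []
    have hc : ((s.foldl (fun d x => d.insert x (d.getD x 0 + 1)) PySem.Dict.empty).getD x 0) =
        (s.count x : Int) := by
      rw [PySem.Dict.getD_foldl_insert_add_one]
      simp [PySem.Dict.getD_empty]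
    rw [hc]
    by_cases hm : minDiff < 0 <;> simp [hm]
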